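-- pv_equiv track=rewrite | github.com/ethanKim93/algorithm_group_study | 0930/박윤지/1242_암호코드_스캔/s1.py | Bbit_print
-- ===== SOURCE A (Python) =====
-- def Bbit_print(i):
--     output = ''
--     for j in range(3, -1, -1):
--         if i & (1 << j):
--             output += '1'
--         else:
--             output += '0'
--     return output
-- ===== SOURCE B (Python) =====
-- def Bbit_print(i):
--     return format(i & 15, '04b')
-- ===== Notes on version B (the rewrite author's own statement) =====
-- stated objective: idiomatic
-- what changed: Replaces the per-bit-position loop that tests each bit and appends '0'/'1' with a single low-bits mask plus a fixed-width binary format of the masked value.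
import Mathlib
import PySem

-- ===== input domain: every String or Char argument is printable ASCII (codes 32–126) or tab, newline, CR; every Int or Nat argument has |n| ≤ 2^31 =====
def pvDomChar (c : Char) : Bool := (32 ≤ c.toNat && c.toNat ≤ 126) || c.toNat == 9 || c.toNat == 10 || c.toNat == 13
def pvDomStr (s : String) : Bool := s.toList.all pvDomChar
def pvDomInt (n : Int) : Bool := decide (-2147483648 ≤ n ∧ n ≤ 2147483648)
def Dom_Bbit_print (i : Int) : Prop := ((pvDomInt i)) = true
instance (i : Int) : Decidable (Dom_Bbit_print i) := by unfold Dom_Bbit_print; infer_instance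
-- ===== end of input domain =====

-- B is the idiomatic one-liner: mask the low four bits and format the result as a 4-digit binary string.

-- ===== PORT A =====
-- for j in range(3,-1,-1): output += '1' if i & (1 << j) else '0'
-- ('1 << j' is ported as 2 ^ j.toNat: every j produced by range(3,-1,-1) is nonnegative, where they agree)
def Bbit_print (i : Int) : String :=
  (PySem.List.pyRange 3 (-1) (-1)).foldl
    (fun output j =>
      if PySem.Int.band i ((2 : Int) ^ j.toNat) ≠ 0 then output ++ "1" else output ++ "0")
    ""

-- ===== PORT B =====
-- format(m, '04b') for 0 ≤ m < 16 ported by hand as the four binary digits of m (exact: i & 15 ∈ [0,16))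
def pvBitChar (x : Nat) : Char := if x % 2 = 1 then '1' else '0'

def Bbit_print_alt (i : Int) : String :=
  let m := (PySem.Int.band i 15).toNat
  String.ofList [pvBitChar (m / 8), pvBitChar (m / 4), pvBitChar (m / 2), pvBitChar m]

-- ===== PRECONDITION & SPEC =====
def Spec_Bbit_print (i : Int) (out : String) : Prop := out = Bbit_print_alt i
instance (i : Int) (out : String) : Decidable (Spec_Bbit_print i out) := by unfold Spec_Bbit_print; infer_instance

-- ===== CLAIM (what is proved, stated in full; the proofs are below) =====
def Claim_equal_Bbit_print : Prop := ∀ (i : Int), Dom_Bbit_print i → Spec_Bbit_print i (Bbit_print i)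

-- ===== LEMMAS AND PROOFS =====

-- masking a number below 16 only reads the low four bits of the other argument
theorem nat_and_mod16 (a m : Nat) (hm : m < 16) : a &&& m = (a % 16) &&& m := by
  apply Nat.eq_of_testBit_eq
  intro j
  rcases Nat.lt_or_ge j 4 with hj | hj
  · have h : (a % 16).testBit j = a.testBit j := by
      rw [show (16 : Nat) = 2 ^ 4 from rfl, Nat.testBit_mod_two_pow]
      simp [hj]
    simp [Nat.testBit_and, h]
  · have hmj : m.testBit j = false := by
      apply Nat.testBit_lt_two_pow
      calc m < 16 := hm
        _ = 2 ^ 4 := by norm_num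
        _ ≤ 2 ^ j := Nat.pow_le_pow_right (by norm_num) hj
    simp [Nat.testBit_and, hmj]

-- Python's i & m for 0 ≤ m < 16 depends only on i mod 16 (two's complement low bits)
theorem band_mask (i : Int) (m : Nat) (hm : m < 16) :
    PySem.Int.band i (m : Int) = (((i % 16).toNat &&& m : Nat) : Int) := by
  rcases Int.lt_or_le i 0 with hi | hi
  · obtain ⟨n, hn⟩ : ∃ n : Nat, i = -(n : Int) - 1 :=
      ⟨(-i - 1).toNat, by omega⟩
    subst hn
    have hb : ¬ (0 ≤ -(n : Int) - 1) := by omega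
    have hnn : (-(-(n : Int) - 1) - 1).toNat = n := by omega
    have hr : ((-(n : Int) - 1) % 16).toNat = 15 - n % 16 := by omega
    rw [PySem.Int.band, if_neg hb, if_pos (by positivity)]
    simp only [Int.toNat_natCast, hnn, hr]
    have hsw : m &&& n = m &&& (n % 16) := by
      rw [Nat.and_comm, nat_and_mod16 n m hm, Nat.and_comm]
    rw [hsw]
    have hx : n % 16 < 16 := Nat.mod_lt _ (by norm_num)
    have key : ∀ x < 16, ∀ m' < 16,
        ((m' - (m' &&& x) : Nat) : Int) = (((15 - x) &&& m' : Nat) : Int) := by decide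
    exact key (n % 16) hx m hm
  · have h16 : (0:Int) < 16 := by norm_num
    have hmod : (i % 16).toNat = i.toNat % 16 := by omega
    rw [PySem.Int.band, if_pos hi, if_pos (by positivity)]
    simp only [Int.toNat_natCast, hmod]
    rw [nat_and_mod16 i.toNat m hm]

theorem both_eq (i : Int) : Bbit_print i = Bbit_print_alt i := by
  have h8 : PySem.Int.band i 8 = (((i % 16).toNat &&& 8 : Nat) : Int) := by
    exact_mod_cast band_mask i 8 (by norm_num)
  have h4 : PySem.Int.band i 4 = (((i % 16).toNat &&& 4 : Nat) : Int) := by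
    exact_mod_cast band_mask i 4 (by norm_num)
  have h2 : PySem.Int.band i 2 = (((i % 16).toNat &&& 2 : Nat) : Int) := by
    exact_mod_cast band_mask i 2 (by norm_num)
  have h1 : PySem.Int.band i 1 = (((i % 16).toNat &&& 1 : Nat) : Int) := by
    exact_mod_cast band_mask i 1 (by norm_num)
  have h15 : PySem.Int.band i 15 = (((i % 16).toNat &&& 15 : Nat) : Int) := by
    exact_mod_cast band_mask i 15 (by norm_num)
  have hr : (i % 16).toNat < 16 := by omega
  have hrange : PySem.List.pyRange 3 (-1) (-1) = [3, 2, 1, 0] := by decide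
  simp only [Bbit_print, Bbit_print_alt, hrange, List.foldl]
  simp only [show (2:Int) ^ (3:Int).toNat = 8 by decide, show (2:Int) ^ (2:Int).toNat = 4 by decide,
    show (2:Int) ^ (1:Int).toNat = 2 by decide, show (2:Int) ^ (0:Int).toNat = 1 by decide]
  rw [h8, h4, h2, h1, h15]
  revert hr
  generalize (i % 16).toNat = r
  intro hr
  interval_cases r <;> decide

-- ===== VERDICT (by name: the statement is the Claim_ definition above) =====
theorem Bbit_print_spec : Claim_equal_Bbit_print := by
  intro i _
  exact both_eq i
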